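-- pv_equiv track=rewrite | github.com/Sigmanificient/codewars | src/python/katas/py4kyu/range_extraction.py | solution
-- ===== SOURCE A (Python) =====
-- from typing import List
--
-- def solution(args: List[int]) -> str:
--     sub, seq = [args[0]], []
--
--     for arg, nex in zip(args, args[1::]):
--         if arg + 1 == nex:
--             sub.append(nex)
--
--         else:
--             seq.append(sub)
--             sub = [nex]
--
--     seq.append(sub)
--
--     return ','.join(
--         f"{i[0]}-{i[-1]}" if len(i) > 2 else ','.join(map(str, i))
--         for i in seq
--     )
-- ===== SOURCE B (Python) =====
-- def solution(args):
--     # right-to-left scan: run-length accumulator, pieces emitted at run starts,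
--     # endpoints computed arithmetically (args[i] + run - 1), output built back-to-front
--     out = []
--     run = 0
--     n = len(args)
--     for i in range(n - 1, -1, -1):
--         run = run + 1 if i + 1 < n and args[i] + 1 == args[i + 1] else 1
--         if i == 0 or args[i - 1] + 1 != args[i]:
--             v = args[i]
--             if run > 2:
--                 out.append(f"{v}-{v + run - 1}")
--             elif run == 2:
--                 out.append(f"{v},{v + 1}")
--             else:
--                 out.append(str(v))
--     return ','.join(reversed(out))
-- ===== Notes on version B (the rewrite author's own statement) =====
-- stated objective: alternative
-- what changed: Replaces A's forward fold that materialises a list of run-sublists plus a separate formatting pass by a right-to-left scan with a run-length counter that emits one output piece per run at its start index, computing run endpoints arithmetically (v+run-1) instead of indexing sublists, and building the parts list back-to-front.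
import Mathlib
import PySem

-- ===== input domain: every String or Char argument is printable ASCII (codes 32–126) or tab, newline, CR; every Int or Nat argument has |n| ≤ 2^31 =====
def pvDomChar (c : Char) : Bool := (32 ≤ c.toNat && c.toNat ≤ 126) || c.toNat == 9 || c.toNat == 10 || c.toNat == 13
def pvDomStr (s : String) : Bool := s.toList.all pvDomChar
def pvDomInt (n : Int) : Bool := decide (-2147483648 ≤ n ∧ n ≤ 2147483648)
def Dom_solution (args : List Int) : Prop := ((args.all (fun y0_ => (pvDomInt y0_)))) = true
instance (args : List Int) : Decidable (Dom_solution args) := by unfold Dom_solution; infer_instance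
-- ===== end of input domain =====

-- B replaces A's "forward fold into run-sublists + formatting pass" by a right-to-left scan
-- with a run-length counter that emits one piece per run with arithmetic endpoints
-- (objective: alternative decomposition; same cost).
-- A raises IndexError on the empty list (it reads the first element) — excluded by Pre_solution.

-- ===== PORT A =====
def solution (args : List Int) : String :=
  -- reading the first element: IndexError on the empty list — Pre_solution excludes it; the .getD 0 is unreachable under Pre_
  let a0 : Int := (PySem.List.pyGet? args 0).getD 0
  let st := (List.zip args (PySem.List.slice args (some 1) none)).foldl
      (fun (st : List Int × List (List Int)) p =>
        if p.1 + 1 = p.2 then (st.1 ++ [p.2], st.2) else ([p.2], st.2 ++ [st.1]))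
      ([a0], [])
  let seq := st.2 ++ [st.1]
  PySem.Str.join "," (seq.map (fun i =>
    if i.length > 2 then
      PySem.Int.toStr ((PySem.List.pyGet? i 0).getD 0) ++ "-" ++ PySem.Int.toStr ((PySem.List.pyGet? i (-1)).getD 0)
    else PySem.Str.join "," (i.map PySem.Int.toStr)))

-- ===== PORT B =====
-- the piece appended for a run of length `run` starting at value v
def bPiece (v : Int) (run : Nat) : String :=
  if run > 2 then PySem.Int.toStr v ++ "-" ++ PySem.Int.toStr (v + (run : Int) - 1)
  else if run = 2 then PySem.Int.toStr v ++ "," ++ PySem.Int.toStr (v + 1)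
  else PySem.Int.toStr v

-- one iteration of the loop body at index i on state (out, run); indices are in range,
-- so List.getD is Python-exact here
def bStep (args : List Int) (i : Nat) (prev : List String × Nat) : List String × Nat :=
  let run : Nat :=
    if i + 1 < args.length ∧ args.getD i 0 + 1 = args.getD (i + 1) 0 then prev.2 + 1 else 1
  if i = 0 ∨ args.getD (i - 1) 0 + 1 ≠ args.getD i 0 then
    (prev.1 ++ [bPiece (args.getD i 0) run], run)
  else (prev.1, run)

-- the descending loop `for i in range(n-1, -1, -1)` as recursion: the state after
-- processing indices n-1 … i (the iterations at higher indices run first)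
def bLoop (args : List Int) (i : Nat) : List String × Nat :=
  bStep args i (if _h : i + 1 < args.length then bLoop args (i + 1) else ([], 0))
termination_by args.length - i

def solution_alt (args : List Int) : String :=
  -- the loop body never runs on the empty list (out stays []); otherwise it runs from n-1 down to 0
  let out := if 0 < args.length then (bLoop args 0).1 else []
  PySem.Str.join "," out.reverse

-- ===== PRECONDITION & SPEC =====
-- Pre_ excludes exactly the empty list, on which A raises IndexError reading the first element.
def Pre_solution (args : List Int) : Prop := args ≠ []
instance (args : List Int) : Decidable (Pre_solution args) := by unfold Pre_solution; infer_instance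
def pvWitness_solution : List Int := ([1, 2, 3, 5])

def Spec_solution (args : List Int) (out : String) : Prop := out = solution_alt args
instance (args : List Int) (out : String) : Decidable (Spec_solution args out) := by unfold Spec_solution; infer_instance

-- ===== CLAIM (what is proved, stated in full; the proofs are below) =====
def Claim_equal_solution : Prop := ∀ (args : List Int), Dom_solution args → Pre_solution args → Spec_solution args (solution args)

-- ===== LEMMAS AND PROOFS =====

-- the maximal consecutive runs of a :: t : (first run, remaining runs)
def runsFrom : Int → List Int → List Int × List (List Int)
  | a, [] => ([a], [])
  | a, b :: t =>
    let p := runsFrom b t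
    if a + 1 = b then (a :: p.1, p.2) else ([a], p.1 :: p.2)

theorem runsFrom_fst_cons (a : Int) (t : List Int) :
    (runsFrom a t).1 = a :: (runsFrom a t).1.tail := by
  cases t <;> simp only [runsFrom] <;> try rfl
  split <;> rfl

theorem runsFrom_snd_ne_nil (t : List Int) (a : Int) :
    ∀ l ∈ (runsFrom a t).2, l ≠ [] := by
  induction t generalizing a with
  | nil => simp [runsFrom]
  | cons b t ih =>
    simp only [runsFrom]
    split
    · exact ih b
    · intro l hl
      simp only [List.mem_cons] at hl
      rcases hl with h | h
      · rw [h, runsFrom_fst_cons b t]; simp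
      · exact ih b l h

-- A's fold over zip computes exactly the runs
theorem foldA (t : List Int) (a : Int) (sub : List Int) (seq : List (List Int)) :
    ((List.zip (a :: t) t).foldl
        (fun (st : List Int × List (List Int)) p =>
          if p.1 + 1 = p.2 then (st.1 ++ [p.2], st.2) else ([p.2], st.2 ++ [st.1]))
        (sub, seq)).2
    ++ [((List.zip (a :: t) t).foldl
        (fun (st : List Int × List (List Int)) p =>
          if p.1 + 1 = p.2 then (st.1 ++ [p.2], st.2) else ([p.2], st.2 ++ [st.1]))
        (sub, seq)).1]
    = seq ++ ((sub ++ (runsFrom a t).1.tail) :: (runsFrom a t).2) := by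
  induction t generalizing a sub seq with
  | nil => simp [runsFrom]
  | cons b t ih =>
    simp only [List.zip_cons_cons, List.foldl_cons, runsFrom]
    by_cases hab : a + 1 = b
    · rw [if_pos hab, if_pos hab]
      rw [ih b (sub ++ [b]) seq]
      have h1 := runsFrom_fst_cons b t
      conv_lhs => rw [h1]
      simp
      exact h1.symm
    · rw [if_neg hab, if_neg hab]
      rw [ih b [b] (seq ++ [sub])]
      have h1 := runsFrom_fst_cons b t
      conv_rhs => rw [h1]
      simp

-- index facts
theorem getD_of_drop (args : List Int) (i : Nat) (a : Int) (t : List Int)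
    (h : args.drop i = a :: t) (k : Nat) : args.getD (i + k) 0 = (a :: t).getD k 0 := by
  simp only [List.getD_eq_getElem?_getD, ← List.getElem?_drop, h]

theorem length_of_drop (args : List Int) (i : Nat) (a : Int) (t : List Int)
    (h : args.drop i = a :: t) : args.length = i + 1 + t.length := by
  have h1 := congrArg List.length h
  simp only [List.length_drop, List.length_cons] at h1
  have : i < args.length := by
    by_contra hc
    rw [List.drop_eq_nil_of_le (by omega)] at h
    exact absurd h (by simp)
  omega

theorem drop_succ_of_drop (args : List Int) (i : Nat) (a : Int) (t : List Int)
    (h : args.drop i = a :: t) : args.drop (i + 1) = t := by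
  have h2 : args.drop (i + 1) = (args.drop i).drop 1 := by rw [List.drop_drop]
  rw [h2, h]; rfl

-- runs are arithmetic chains v, v+1, …, v+L-1
def chainL (v : Int) : Nat → List Int
  | 0 => []
  | n + 1 => v :: chainL (v + 1) n

theorem chainL_length (v : Int) (n : Nat) : (chainL v n).length = n := by
  induction n generalizing v with
  | zero => rfl
  | succ n ih => simp [chainL, ih]

theorem chainL_getLastD (v : Int) (n : Nat) : (chainL v (n + 1)).getLastD 0 = v + n := by
  induction n generalizing v with
  | zero => simp [chainL]
  | succ n ih =>
    rw [chainL, List.getLastD_cons]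
    have h := ih (v + 1)
    rw [show chainL (v+1) (n+1) = chainL (v+1) (n+1) from rfl] at h
    cases hc : chainL (v + 1) (n + 1) with
    | nil => exact absurd (congrArg List.length hc) (by simp [chainL_length])
    | cons x u =>
      rw [hc] at h
      simp only [List.getLastD_cons] at h ⊢
      rw [h]; push_cast; ring

theorem runs_chain (t : List Int) (a : Int) :
    (runsFrom a t).1 = chainL a (runsFrom a t).1.length ∧
    ∀ r ∈ (runsFrom a t).2, r = chainL (r.headD 0) r.length := by
  induction t generalizing a with
  | nil => exact ⟨rfl, by simp [runsFrom]⟩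
  | cons b t ih =>
    obtain ⟨h1, h2⟩ := ih b
    have hc := runsFrom_fst_cons b t
    simp only [runsFrom]
    by_cases hab : a + 1 = b
    · rw [if_pos hab]
      refine ⟨?_, h2⟩
      simp only [List.length_cons]
      rw [chainL, hab, ← h1]
    · rw [if_neg hab]
      refine ⟨rfl, ?_⟩
      intro r hr
      simp only [List.mem_cons] at hr
      rcases hr with h | h
      · subst h
        have : (runsFrom b t).1.headD 0 = b := by rw [hc]; rfl
        rw [this]; exact h1
      · exact h2 r h

-- the per-run piece, B's view
def pieceRun (r : List Int) : String := bPiece (r.headD 0) r.length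

-- A's per-run format string equals B's piece for any arithmetic chain run
theorem perRun (r : List Int) (hch : r = chainL (r.headD 0) r.length) (hne : r ≠ []) :
    (if r.length > 2 then
        PySem.Int.toStr ((PySem.List.pyGet? r 0).getD 0) ++ "-" ++ PySem.Int.toStr ((PySem.List.pyGet? r (-1)).getD 0)
     else PySem.Str.join "," (r.map PySem.Int.toStr)) = pieceRun r := by
  obtain ⟨v, u, hr⟩ : ∃ v u, r = v :: u := by
    cases r with
    | nil => exact absurd rfl hne
    | cons v u => exact ⟨v, u, rfl⟩
  have hhead : r.headD 0 = v := by rw [hr]; rfl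
  by_cases hlen : r.length > 2
  · rw [if_pos hlen, pieceRun, bPiece, if_pos hlen]
    have e1 : (PySem.List.pyGet? r 0).getD 0 = v := by
      rw [hr]; simp [PySem.List.pyGet?, PySem.List.pyIdx?]
    have e2 : (PySem.List.pyGet? r (-1)).getD 0 = v + (r.length : Int) - 1 := by
      rw [PySem.List.pyGet?_neg_one, ← List.getLastD_eq_getLast?]
      have hl : ∃ m, r.length = m + 1 := ⟨u.length, by rw [hr]; rfl⟩
      obtain ⟨m, hm⟩ := hl
      rw [hch, hhead, hm, chainL_getLastD, chainL_length]
      push_cast; ring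
    rw [e1, e2, hhead]
  · rw [if_neg hlen, pieceRun, bPiece, if_neg hlen, hhead]
    have hl1 : 1 ≤ r.length := by rw [hr]; simp
    interval_cases h : r.length
    · -- length 1 : r = [v]
      have : r = [v] := by
        rw [hch, hhead]; rfl
      rw [if_neg (by omega), this]
      apply String.toList_inj.mp
      simp [PySem.Str.toList_join, PySem.Chars.join_singleton]
    · -- length 2 : r = [v, v+1]
      have : r = [v, v + 1] := by
        rw [hch, hhead]; rfl
      rw [if_pos rfl, this]
      apply String.toList_inj.mp
      simp [PySem.Str.toList_join, PySem.Chars.join_cons_cons, PySem.Chars.join_singleton]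

-- the descending loop: state after processing indices n-1 … i, for suffix a :: t at i
theorem bLoop_spec (t : List Int) (a : Int) (args : List Int) (i : Nat)
    (h : args.drop i = a :: t) :
    bLoop args i =
      (((if i = 0 ∨ args.getD (i - 1) 0 + 1 ≠ a then (runsFrom a t).1 :: (runsFrom a t).2
         else (runsFrom a t).2).map pieceRun).reverse,
       (runsFrom a t).1.length) := by
  induction t generalizing a i with
  | nil =>
    have hl : args.length = i + 1 := by simpa using length_of_drop args i a [] h
    have hga : args.getD i 0 = a := by simpa using getD_of_drop args i a [] h 0
    rw [bLoop, dif_neg (by omega)]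
    simp only [bStep, hga, runsFrom]
    rw [if_neg (show ¬(i + 1 < args.length ∧ a + 1 = args.getD (i + 1) 0) from
      fun hcon => absurd hcon.1 (by omega))]
    split
    · simp [pieceRun]
    · rfl
  | cons b t ih =>
    have hl : args.length = i + 2 + t.length := by
      have := length_of_drop args i a (b :: t) h; simp at this; omega
    have hga : args.getD i 0 = a := by simpa using getD_of_drop args i a (b :: t) h 0
    have hgb : args.getD (i + 1) 0 = b := by simpa using getD_of_drop args i a (b :: t) h 1
    have hdrop : args.drop (i + 1) = b :: t := drop_succ_of_drop args i a (b :: t) h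
    have hprev := ih b (i + 1) hdrop
    simp only [Nat.add_sub_cancel, hga, Nat.succ_ne_zero, false_or] at hprev
    rw [bLoop, dif_pos (by omega), hprev]
    by_cases hab : a + 1 = b
    · rw [if_neg (by simp [hab])]
      simp only [bStep, hga, hgb, runsFrom, if_pos hab]
      rw [if_pos (show i + 1 < args.length ∧ a + 1 = b from ⟨by omega, hab⟩)]
      split
      · simp [pieceRun]
      · rfl
    · rw [if_pos (by simp [hab])]
      simp only [bStep, hga, hgb, runsFrom, if_neg hab]
      rw [if_neg (show ¬(i + 1 < args.length ∧ a + 1 = b) from fun hcon => hab hcon.2)]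
      split
      · simp [pieceRun]
      · rfl

-- ===== VERDICT (by name: the statement is the Claim_ definition above) =====
theorem solution_spec : Claim_equal_solution := by
  intro args _ hpre
  unfold Spec_solution
  cases args with
  | nil => exact absurd rfl hpre
  | cons a t =>
    unfold solution solution_alt
    rw [PySem.List.slice_from_one]
    simp only [List.tail_cons]
    have ha0 : (PySem.List.pyGet? (a :: t) 0).getD 0 = a := by
      simp [PySem.List.pyGet?, PySem.List.pyIdx?]
    rw [ha0]
    have hseq := foldA t a [a] []
    have hrc := runsFrom_fst_cons a t
    have hL : [] ++ (([a] ++ (runsFrom a t).1.tail) :: (runsFrom a t).2)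
        = (runsFrom a t).1 :: (runsFrom a t).2 := by
      simp only [List.nil_append, List.singleton_append]
      rw [← hrc]
    rw [hL] at hseq
    rw [show ((List.zip (a :: t) t).foldl
        (fun (st : List Int × List (List Int)) p =>
          if p.1 + 1 = p.2 then (st.1 ++ [p.2], st.2) else ([p.2], st.2 ++ [st.1]))
        ([a], [])).2
      ++ [((List.zip (a :: t) t).foldl
        (fun (st : List Int × List (List Int)) p =>
          if p.1 + 1 = p.2 then (st.1 ++ [p.2], st.2) else ([p.2], st.2 ++ [st.1]))
        ([a], [])).1] = (runsFrom a t).1 :: (runsFrom a t).2 from hseq]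
    rw [if_pos (by simp : 0 < (a :: t).length)]
    rw [bLoop_spec t a (a :: t) 0 rfl]
    rw [if_pos (Or.inl rfl)]
    simp only [List.reverse_reverse]
    congr 1
    apply List.map_congr_left
    intro r hr
    obtain ⟨hch1, hch2⟩ := runs_chain t a
    rcases List.mem_cons.mp hr with hfst | hsnd
    · subst hfst
      refine perRun _ ?_ (by rw [hrc]; simp)
      have : (runsFrom a t).1.headD 0 = a := by rw [hrc]; rfl
      rw [this]; exact hch1
    · exact perRun r (hch2 r hsnd) (runsFrom_snd_ne_nil t a r hsnd)
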